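-- pv_equiv track=rewrite | github.com/prof-ramos/BotSalinha | src/utils/input_sanitizer.py | has_consecutive_special_chars
-- ===== SOURCE A (Python) =====
-- from typing import Final, Literal
--
-- MAX_CONSECUTIVE_SPECIAL: Final[int] = 3
--
-- def has_consecutive_special_chars(text: str, threshold: int = MAX_CONSECUTIVE_SPECIAL) -> bool:
--     """Detect excessive repetition of special characters."""
--     special_chars = set("!@#$%^&*()_+=[]{};:'\"<>?/\\|`~")
--     consecutive = 0
--     for char in text:
--         if char in special_chars:
--             consecutive += 1
--             if consecutive >= threshold:
--                 return True
--         else: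
--             consecutive = 0
--     return False
-- ===== SOURCE B (Python) =====
-- from itertools import groupby
--
-- MAX_CONSECUTIVE_SPECIAL = 3
--
-- def has_consecutive_special_chars(text: str, threshold: int = MAX_CONSECUTIVE_SPECIAL) -> bool:
--     """Detect excessive repetition of special characters (run-based)."""
--     special_chars = set("!@#$%^&*()_+=[]{};:'\"<>?/\\|`~")
--     return any(is_special and sum(1 for _ in run) >= threshold
--                for is_special, run in groupby(text, key=lambda c: c in special_chars))
-- ===== Notes on version B (the rewrite author's own statement) =====
-- stated objective: alternative
-- what changed: Replaces the counter-with-early-return scan by splitting the text into maximal runs via itertools.groupby and checking whether any special run has length >= threshold.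
import Mathlib
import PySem

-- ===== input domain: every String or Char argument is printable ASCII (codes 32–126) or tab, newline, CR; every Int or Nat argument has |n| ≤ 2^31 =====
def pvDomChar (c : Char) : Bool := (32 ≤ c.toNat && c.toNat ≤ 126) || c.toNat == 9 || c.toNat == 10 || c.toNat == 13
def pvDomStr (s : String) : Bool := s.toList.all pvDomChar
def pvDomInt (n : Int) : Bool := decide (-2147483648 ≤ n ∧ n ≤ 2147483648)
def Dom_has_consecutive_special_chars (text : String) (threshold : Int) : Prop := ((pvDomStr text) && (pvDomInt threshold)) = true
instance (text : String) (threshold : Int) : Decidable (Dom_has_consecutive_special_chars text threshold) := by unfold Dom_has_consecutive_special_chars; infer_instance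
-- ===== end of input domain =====

-- B replaces A's counter-with-early-return scan by splitting the text into maximal
-- runs (Python: itertools.groupby, ported as takeWhile/dropWhile run splitting, exact)
-- and checking whether any special run has length >= threshold. Objective: alternative.

-- ===== PORT A =====
def pvSpecial : List Char := "!@#$%^&*()_+=[]{};:'\"<>?/\\|`~".toList

def pvIsSpec (c : Char) : Bool := pvSpecial.contains c

-- the for-loop of A: counter, early return when counter >= threshold
def pvALoop (cs : List Char) (consecutive : Int) (threshold : Int) : Bool :=
  match cs with
  | [] => false
  | c :: rest =>
    if pvIsSpec c then
      let consecutive := consecutive + 1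
      if consecutive ≥ threshold then true else pvALoop rest consecutive threshold
    else pvALoop rest 0 threshold

def has_consecutive_special_chars (text : String) (threshold : Int) : Bool :=
  pvALoop text.toList 0 threshold

-- ===== PORT B =====
-- groupby(text, key = c in special_chars): maximal runs as (key, run length)
def pvRuns (cs : List Char) : List (Bool × Nat) :=
  match cs with
  | [] => []
  | c :: rest =>
    (pvIsSpec c, (rest.takeWhile (fun d => pvIsSpec d == pvIsSpec c)).length + 1)
      :: pvRuns (rest.dropWhile (fun d => pvIsSpec d == pvIsSpec c))
termination_by cs.length
decreasing_by
  have := List.length_dropWhile_le (fun d => pvIsSpec d == pvIsSpec c) rest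
  simp; omega

def has_consecutive_special_chars_alt (text : String) (threshold : Int) : Bool :=
  (pvRuns text.toList).any (fun r => r.1 && decide (threshold ≤ (r.2 : Int)))

-- ===== PRECONDITION & SPEC =====
def Spec_has_consecutive_special_chars (text : String) (threshold : Int) (out : Bool) : Prop := out = has_consecutive_special_chars_alt text threshold
instance (text : String) (threshold : Int) (out : Bool) : Decidable (Spec_has_consecutive_special_chars text threshold out) := by unfold Spec_has_consecutive_special_chars; infer_instance

-- ===== CLAIM (what is proved, stated in full; the proofs are below) =====
def Claim_equal_has_consecutive_special_chars : Prop := ∀ (text : String) (threshold : Int), Dom_has_consecutive_special_chars text threshold → Spec_has_consecutive_special_chars text threshold (has_consecutive_special_chars text threshold)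

-- ===== LEMMAS AND PROOFS =====

theorem pv_if_true_or (c : Prop) [Decidable c] (x : Bool) :
    (if c then true else x) = (decide c || x) := by
  by_cases h : c <;> simp [h]

-- A's loop over a run of special chars: true iff the run pushes the counter past the
-- threshold, else it continues past the run with the grown counter.
theorem pvALoop_spec_run (run : List Char) (h : ∀ c ∈ run, pvIsSpec c = true) :
    ∀ (rest : List Char) (k t : Int),
      pvALoop (run ++ rest) k t =
        ((!run.isEmpty && decide (t ≤ k + (run.length : Int))) || pvALoop rest (k + run.length) t) := by
  induction run with
  | nil => intro rest k t; simp
  | cons c run' ih =>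
    intro rest k t
    have hc : pvIsSpec c = true := h c (List.mem_cons_self ..)
    have h' : ∀ d ∈ run', pvIsSpec d = true := fun d hd => h d (List.mem_cons_of_mem _ hd)
    simp only [List.cons_append, pvALoop, hc, if_true]
    rw [pv_if_true_or, ih h']
    have e : k + 1 + (run'.length : Int) = k + ((c :: run').length : Int) := by
      push_cast [List.length_cons]; ring
    rw [e]
    cases run' with
    | nil => simp [ge_iff_le]
    | cons d run'' =>
      have hK : t ≤ k + 1 → t ≤ k + ((c :: d :: run'').length : Int) := by
        intro h1; push_cast [List.length_cons]; push_cast [List.length_cons] at e; omega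
      by_cases h1 : t ≤ k + 1
      · have h2 : t ≤ k + ((run''.length : Int) + 1 + 1) := by
          have := hK h1; push_cast at this; omega
        simp [ge_iff_le, h1, h2]
      · simp [ge_iff_le, h1]

-- A's loop over a run of non-special chars just resets the counter.
theorem pvALoop_reset (run : List Char) (h : ∀ c ∈ run, pvIsSpec c = false) :
    ∀ (rest : List Char) (k t : Int),
      pvALoop (run ++ rest) k t = (if run.isEmpty then pvALoop rest k t else pvALoop rest 0 t) := by
  induction run with
  | nil => intro rest k t; simp
  | cons c run' ih =>
    intro rest k t
    have hc : pvIsSpec c = false := h c (List.mem_cons_self ..)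
    have h' : ∀ d ∈ run', pvIsSpec d = false := fun d hd => h d (List.mem_cons_of_mem _ hd)
    simp only [List.cons_append, pvALoop, hc, Bool.false_eq_true, if_false]
    rw [ih h' rest 0 t]
    simp

-- main: A's scan equals B's run-based check
theorem pvALoop_eq_runs (cs : List Char) : ∀ t : Int,
    pvALoop cs 0 t = (pvRuns cs).any (fun r => r.1 && decide (t ≤ (r.2 : Int))) := by
  induction cs using pvRuns.induct with
  | case1 => intro t; simp [pvALoop, pvRuns]
  | case2 c rest ih =>
    intro t
    unfold pvRuns
    rw [List.any_cons]
    set p : Char → Bool := fun d => pvIsSpec d == pvIsSpec c with hp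
    have hdec : c :: rest = (c :: rest.takeWhile p) ++ rest.dropWhile p := by
      simp [List.takeWhile_append_dropWhile]
    by_cases hs : pvIsSpec c = true
    · -- leading run is special; past it the counter value is irrelevant:
      -- the remainder is empty or starts with a non-special char
      have hcont : ∀ (k t' : Int), pvALoop (rest.dropWhile p) k t' = pvALoop (rest.dropWhile p) 0 t' := by
        intro k t'
        cases hdw : rest.dropWhile p with
        | nil => simp [pvALoop]
        | cons d rest2 =>
          have hd : p d = false := by
            have := List.head_dropWhile_not p (l := rest) (by simp [hdw])
            simpa [hdw] using this
          have hsd' : pvIsSpec d = false := by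
            have hd2 : (pvIsSpec d == pvIsSpec c) = false := hd
            cases hq : pvIsSpec d
            · rfl
            · rw [hq, hs] at hd2; simp at hd2
          simp [pvALoop, hsd']
      have hall : ∀ d ∈ c :: rest.takeWhile p, pvIsSpec d = true := by
        intro d hd
        rcases List.mem_cons.mp hd with h | h
        · subst h; exact hs
        · have := List.mem_takeWhile_imp h
          rw [hp] at this; simp only [beq_iff_eq] at this; rw [this, hs]
      rw [hdec, pvALoop_spec_run _ hall, hcont, ih t]
      have e1 : (0 : Int) + ((c :: rest.takeWhile p).length : Int)
          = (((rest.takeWhile p).length + 1 : Nat) : Int) := by push_cast [List.length_cons]; ring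
      rw [e1]
      simp [hs]
    · -- leading run is non-special: the counter stays reset, the run contributes nothing
      have hs' : pvIsSpec c = false := by cases hq : pvIsSpec c; rfl; exact absurd hq hs
      have hall : ∀ d ∈ c :: rest.takeWhile p, pvIsSpec d = false := by
        intro d hd
        rcases List.mem_cons.mp hd with h | h
        · subst h; exact hs'
        · have := List.mem_takeWhile_imp h
          rw [hp] at this; simp only [beq_iff_eq] at this; rw [this, hs']
      rw [hdec, pvALoop_reset _ hall]
      simp only [List.isEmpty_cons, if_neg (by simp : ¬((false : Bool) = true))]
      rw [ih t]
      simp [hs']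

-- ===== VERDICT (by name: the statement is the Claim_ definition above) =====
theorem has_consecutive_special_chars_spec : Claim_equal_has_consecutive_special_chars := by
  intro text threshold _
  unfold Spec_has_consecutive_special_chars has_consecutive_special_chars has_consecutive_special_chars_alt
  exact pvALoop_eq_runs text.toList threshold
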